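-- pv_equiv track=rewrite | github.com/Victoria-Rodrigues/Grafo-BibliotecaVersao1.1 | Classes/GrafoDirigido.py | pegarVerticeMenorGrau
-- ===== SOURCE A (Python) =====
-- def pegarVerticeMenorGrau(grafo, N):
--     cont = 0
--     maiorCont = 999
--     menor = None
--     for vertice in N:
--         for vertice2 in N:
--             if grafo[int(vertice2)- 1][int(vertice)- 1] != 0:
--                 cont += 1
--
--         if cont < maiorCont:
--             menor = vertice
--             maiorCont = cont
--         cont = 0
--     return menor
-- ===== SOURCE B (Python) =====
-- def pegarVerticeMenorGrau(grafo, N):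
--     # scatter-accumulate: build an in-degree table keyed by vertex, then select
--     deg = {a: 0 for a in N}
--     for b in N:
--         linha = grafo[int(b) - 1]
--         for a in deg:
--             if linha[int(a) - 1] != 0:
--                 deg[a] += 1
--     menor = None
--     melhor = 999
--     for a in N:
--         if deg[a] < melhor:
--             melhor = deg[a]
--             menor = a
--     return menor
-- ===== Notes on version B (the rewrite author's own statement) =====
-- stated objective: alternative
-- what changed: B replaces A's per-vertex re-scan of its column (recomputing the in-degree count inside the selection loop) by a scatter-accumulate pass that builds an in-degree table keyed by vertex once, followed by a separate selection pass over that table.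
import Mathlib
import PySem

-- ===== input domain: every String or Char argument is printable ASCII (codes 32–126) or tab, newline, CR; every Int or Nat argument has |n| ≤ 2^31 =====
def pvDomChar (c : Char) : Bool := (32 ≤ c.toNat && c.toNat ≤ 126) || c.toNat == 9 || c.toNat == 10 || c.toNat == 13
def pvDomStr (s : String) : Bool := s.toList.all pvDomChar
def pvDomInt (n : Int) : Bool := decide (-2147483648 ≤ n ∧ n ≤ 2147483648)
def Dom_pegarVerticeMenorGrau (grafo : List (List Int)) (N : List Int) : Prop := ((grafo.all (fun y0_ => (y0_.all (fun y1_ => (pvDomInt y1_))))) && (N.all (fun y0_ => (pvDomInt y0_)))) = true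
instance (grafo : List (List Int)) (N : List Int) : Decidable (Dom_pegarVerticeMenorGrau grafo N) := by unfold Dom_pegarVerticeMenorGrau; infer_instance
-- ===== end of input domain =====

-- B builds the in-degree table once (scatter-accumulate over source rows) and then selects,
-- instead of A's re-count of each vertex's column inside the selection loop; same cost class.

-- ===== PORT A =====
-- grafo[v2-1][v-1], total form pyGetD: exact under Pre_ (indices in Python range)
def pvCellA (grafo : List (List Int)) (v2 v : Int) : Int :=
  PySem.List.pyGetD (PySem.List.pyGetD grafo (v2 - 1) []) (v - 1) 0

def pegarVerticeMenorGrau (grafo : List (List Int)) (N : List Int) : Option Int :=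
  let step := fun (st : Int × Int × Option Int) (vertice : Int) =>
    let cont := N.foldl (fun c vertice2 =>
      if pvCellA grafo vertice2 vertice ≠ 0 then c + 1 else c) st.1
    if cont < st.2.1 then (0, cont, some vertice) else (0, st.2.1, st.2.2)
  (N.foldl step (0, 999, none)).2.2

-- ===== PORT B =====
def pegarVerticeMenorGrau_alt (grafo : List (List Int)) (N : List Int) : Option Int :=
  let deg0 : PySem.Dict Int Int := N.foldl (fun d a => d.insert a 0) PySem.Dict.empty
  let deg := N.foldl (fun d b =>
    let linha := PySem.List.pyGetD grafo (b - 1) []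
    d.keys.foldl (fun d' a =>
      if PySem.List.pyGetD linha (a - 1) 0 ≠ 0 then d'.modify a 0 (· + 1) else d') d) deg0
  (N.foldl (fun (st : Int × Option Int) a =>
      if deg.getD a 0 < st.1 then (deg.getD a 0, some a) else st) (999, none)).2

-- ===== PRECONDITION & SPEC =====
-- Pre_ excludes exactly the inputs where the Python A raises IndexError: some pair of
-- vertices in N indexes outside grafo or outside the selected row.
def Pre_pegarVerticeMenorGrau (grafo : List (List Int)) (N : List Int) : Prop :=
  ∀ b ∈ N, PySem.Raise.InRange grafo.length (b - 1) ∧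
    ∀ a ∈ N, PySem.Raise.InRange (PySem.List.pyGetD grafo (b - 1) []).length (a - 1)
instance (grafo : List (List Int)) (N : List Int) : Decidable (Pre_pegarVerticeMenorGrau grafo N) := by unfold Pre_pegarVerticeMenorGrau; infer_instance

def pvWitness_pegarVerticeMenorGrau : List (List Int) × List Int := ([[1, 0], [1, 1]], [1, 2])

def Spec_pegarVerticeMenorGrau (grafo : List (List Int)) (N : List Int) (out : Option Int) : Prop := out = pegarVerticeMenorGrau_alt grafo N
instance (grafo : List (List Int)) (N : List Int) (out : Option Int) : Decidable (Spec_pegarVerticeMenorGrau grafo N out) := by unfold Spec_pegarVerticeMenorGrau; infer_instance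

-- ===== CLAIM (what is proved, stated in full; the proofs are below) =====
def Claim_equal_pegarVerticeMenorGrau : Prop := ∀ (grafo : List (List Int)) (N : List Int), Dom_pegarVerticeMenorGrau grafo N → Pre_pegarVerticeMenorGrau grafo N → Spec_pegarVerticeMenorGrau grafo N (pegarVerticeMenorGrau grafo N)

-- ===== LEMMAS AND PROOFS =====

-- the in-degree of vertex a within N
def pvCnt (grafo : List (List Int)) (N : List Int) (a : Int) : Int :=
  (N.countP (fun b => decide (pvCellA grafo b a ≠ 0)) : Int)

-- common selection fold
def pvSel (grafo : List (List Int)) (N : List Int) (L : List Int) (st : Int × Option Int) : Int × Option Int :=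
  L.foldl (fun st a => if pvCnt grafo N a < st.1 then (pvCnt grafo N a, some a) else st) st

lemma pvA_eq_sel (grafo : List (List Int)) (N L : List Int) (m : Int) (r : Option Int) :
    (L.foldl (fun (st : Int × Int × Option Int) (v : Int) =>
      let cont := N.foldl (fun c v2 => if pvCellA grafo v2 v ≠ 0 then c + 1 else c) st.1
      if cont < st.2.1 then (0, cont, some v) else (0, st.2.1, st.2.2)) (0, m, r)).2.2
    = (pvSel grafo N L (m, r)).2 := by
  induction L generalizing m r with
  | nil => simp [pvSel]
  | cons v L ih =>
    simp only [List.foldl_cons, pvSel, pvCnt]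
    rw [PySem.List.foldl_ite_add_one]
    simp only [zero_add]
    by_cases h : (↑(N.countP fun b => decide (pvCellA grafo b v ≠ 0)) : Int) < m
    · simp only [h]
      exact ih _ _
    · simp only [h]
      exact ih _ _

-- deg0: every key maps to 0
lemma pvDeg0_getD (N : List Int) (d : PySem.Dict Int Int) (a : Int) (h : d.getD a 0 = 0) :
    (N.foldl (fun d a => d.insert a 0) d).getD a 0 = 0 := by
  induction N generalizing d with
  | nil => simpa
  | cons x N ih =>
    simp only [List.foldl_cons]
    apply ih
    rw [PySem.Dict.getD_insert]
    split <;> simp [h]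

lemma pvKeys_sub_update_self {s : PySem.Set Int} (xs : List Int) (h : ∀ x ∈ xs, x ∈ s) :
    PySem.Set.update s xs = s := by
  rw [PySem.Set.update_eq_append_filter]
  have hnil : (PySem.Set.ofList xs).filter (fun y => !(PySem.Set.contains s y)) = [] := by
    rw [List.filter_eq_nil_iff]
    intro y hy
    have hm : y ∈ xs := (PySem.Set.mem_ofList _ _).1 hy
    simpa using h y hm
  rw [hnil]
  simp

-- inner loop: keys unchanged, counts bumped where the cell is nonzero
lemma pvInner_keys (grafo : List (List Int)) (b : Int) (d : PySem.Dict Int Int) :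
    (d.keys.foldl (fun d' a => if PySem.List.pyGetD (PySem.List.pyGetD grafo (b - 1) []) (a - 1) 0 ≠ 0 then d'.modify a 0 (· + 1) else d') d).keys = d.keys := by
  rw [PySem.List.foldl_ite_eq_foldl_filter, PySem.Dict.keys_foldl_modify]
  exact pvKeys_sub_update_self _ (fun x hx => List.mem_of_mem_filter hx)

lemma pvInner_getD (grafo : List (List Int)) (b : Int) (d : PySem.Dict Int Int) (a : Int)
    (hnd : d.keys.Nodup) (ha : a ∈ d.keys) :
    (d.keys.foldl (fun d' a => if PySem.List.pyGetD (PySem.List.pyGetD grafo (b - 1) []) (a - 1) 0 ≠ 0 then d'.modify a 0 (· + 1) else d') d).getD a 0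
    = d.getD a 0 + (if PySem.List.pyGetD (PySem.List.pyGetD grafo (b - 1) []) (a - 1) 0 ≠ 0 then 1 else 0) := by
  rw [PySem.List.foldl_ite_eq_foldl_filter, PySem.Dict.getD_foldl_modify_add_one]
  congr 1
  by_cases h : PySem.List.pyGetD (PySem.List.pyGetD grafo (b - 1) []) (a - 1) 0 ≠ 0
  · rw [List.count_filter (by simpa using h)]
    simp [h, List.count_eq_one_of_mem hnd ha]
  · have hz : List.count a (List.filter (fun x => decide (PySem.List.pyGetD (PySem.List.pyGetD grafo (b - 1) []) (x - 1) 0 ≠ 0)) d.keys) = 0 := by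
      rw [List.count_eq_zero]
      simp [not_not.mp h]
    simp only [decide_not] at hz
    simp [not_not.mp h, hz]

lemma pvOuter_getD (grafo : List (List Int)) (L : List Int) (d : PySem.Dict Int Int) (a : Int)
    (hnd : d.keys.Nodup) (ha : a ∈ d.keys) :
    (L.foldl (fun d b => d.keys.foldl (fun d' a =>
        if PySem.List.pyGetD (PySem.List.pyGetD grafo (b - 1) []) (a - 1) 0 ≠ 0 then d'.modify a 0 (· + 1) else d') d) d).getD a 0
    = d.getD a 0 + (L.countP (fun b => decide (pvCellA grafo b a ≠ 0)) : Int) := by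
  induction L generalizing d with
  | nil => simp
  | cons b L ih =>
    simp only [List.foldl_cons, List.countP_cons]
    have hnd2 : ((d.keys.foldl (fun d' a => if PySem.List.pyGetD (PySem.List.pyGetD grafo (b - 1) []) (a - 1) 0 ≠ 0 then d'.modify a 0 (· + 1) else d') d)).keys.Nodup := by
      rw [pvInner_keys]; exact hnd
    have ha2 : a ∈ ((d.keys.foldl (fun d' a => if PySem.List.pyGetD (PySem.List.pyGetD grafo (b - 1) []) (a - 1) 0 ≠ 0 then d'.modify a 0 (· + 1) else d') d)).keys := by
      rw [pvInner_keys]; exact ha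
    rw [ih _ hnd2 ha2, pvInner_getD grafo b d a hnd ha]
    have : PySem.List.pyGetD (PySem.List.pyGetD grafo (b - 1) []) (a - 1) 0 = pvCellA grafo b a := rfl
    by_cases h : pvCellA grafo b a ≠ 0
    · simp [this, h]; ring
    · simp [this, h]

lemma pvDeg0_keys (N : List Int) :
    (N.foldl (fun d a => d.insert a 0) (PySem.Dict.empty : PySem.Dict Int Int)).keys = PySem.Set.ofList N := by
  rw [PySem.Dict.keys_foldl_insert (f := fun _ _ => (0 : Int))]
  simp [PySem.Set.update_nil_left]

lemma pvDeg_getD (grafo : List (List Int)) (N : List Int) (a : Int) (ha : a ∈ N) :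
    ((N.foldl (fun d b => d.keys.foldl (fun d' a =>
        if PySem.List.pyGetD (PySem.List.pyGetD grafo (b - 1) []) (a - 1) 0 ≠ 0 then d'.modify a 0 (· + 1) else d') d)
      (N.foldl (fun d a => d.insert a 0) (PySem.Dict.empty : PySem.Dict Int Int)))).getD a 0
    = pvCnt grafo N a := by
  have hk := pvDeg0_keys N
  have hnd : (N.foldl (fun d a => d.insert a 0) (PySem.Dict.empty : PySem.Dict Int Int)).keys.Nodup := by
    rw [hk]; exact PySem.Set.nodup_ofList N
  have ha' : a ∈ (N.foldl (fun d a => d.insert a 0) (PySem.Dict.empty : PySem.Dict Int Int)).keys := by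
    rw [hk]; exact (PySem.Set.mem_ofList _ _).2 ha
  rw [pvOuter_getD grafo N _ a hnd ha', pvDeg0_getD N _ a (by simp [PySem.Dict.getD_empty])]
  simp [pvCnt]

lemma pvB_eq_sel (grafo : List (List Int)) (N : List Int) :
    pegarVerticeMenorGrau_alt grafo N = (pvSel grafo N N (999, none)).2 := by
  unfold pegarVerticeMenorGrau_alt pvSel
  simp only []
  apply congrArg Prod.snd
  apply PySem.List.foldl_congr_mem
  intro acc x hx
  rw [pvDeg_getD grafo N x hx]

-- ===== VERDICT (by name: the statement is the Claim_ definition above) =====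
theorem pegarVerticeMenorGrau_spec : Claim_equal_pegarVerticeMenorGrau := by
  intro grafo N _ _
  show pegarVerticeMenorGrau grafo N = pegarVerticeMenorGrau_alt grafo N
  rw [pvB_eq_sel]
  exact pvA_eq_sel grafo N N 999 none
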